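-- pv_equiv track=rewrite | github.com/billyninja/gameworm | wiki.imp/tag_match.py | tag_extract
-- ===== SOURCE A (Python) =====
-- def tag_extract(text):
--     extc = ("{{", "}}")
--     n = 2
--
--     acc = list()
--     for idx, _ in enumerate(text):
--         slc = text[idx:idx + n]
--
--         extM0, extM1 = (slc == extc[0]), (slc == extc[1])
--
--         if extM0:
--             acc.append([idx, None])
--
--         elif extM1:
--             for aci in reversed(acc):
--                 if aci[1] is None:
--                     aci[1] = (idx + 2)
--                     break
--
--     return acc
-- ===== SOURCE B (Python) =====
-- def tag_extract(text):
--     # One pass keeping a stack of indices of still-open entries, popped on a close.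
--     acc = []
--     stack = []
--     n = len(text)
--     for i in range(n):
--         if text[i] == '{' and i + 1 < n and text[i + 1] == '{':
--             stack.append(len(acc))
--             acc.append([i, None])
--         elif text[i] == '}' and i + 1 < n and text[i + 1] == '}':
--             if stack:
--                 acc[stack.pop()][1] = i + 2
--     return acc
-- ===== Notes on version B (the rewrite author's own statement) =====
-- stated objective: faster
-- what changed: A rescans the whole accumulator backwards at every closing marker to find the last open entry; B keeps a stack of indices of open entries and pops in O(1), one pass overall.
import Mathlib
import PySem

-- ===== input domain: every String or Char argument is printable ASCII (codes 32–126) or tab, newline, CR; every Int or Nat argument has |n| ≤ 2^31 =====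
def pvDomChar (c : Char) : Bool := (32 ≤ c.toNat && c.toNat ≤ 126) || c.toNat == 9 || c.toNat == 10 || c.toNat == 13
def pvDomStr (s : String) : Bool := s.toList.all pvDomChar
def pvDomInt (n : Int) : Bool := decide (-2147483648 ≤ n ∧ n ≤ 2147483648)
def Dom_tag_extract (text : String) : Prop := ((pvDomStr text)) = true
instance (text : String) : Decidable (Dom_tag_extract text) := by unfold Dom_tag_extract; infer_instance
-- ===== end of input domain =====

-- B replaces A's backward rescan of the accumulator on every "}}" by a stack of
-- indices of still-open entries (popped in O(1)); return values are identical.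

-- ===== PORT A =====
-- 'for aci in reversed(acc): if aci[1] is None: aci[1] = v; break'
def closeRevA : List (List (Option Int)) → Int → List (List (Option Int))
  | [], _ => []
  | x :: xs, v =>
    if PySem.List.pyGet? x 1 = some none then x.set 1 (some v) :: xs
    else x :: closeRevA xs v

def stepA (cs : List Char) (acc : List (List (Option Int))) (p : Int × Char) :
    List (List (Option Int)) :=
  let slc := PySem.List.slice cs (some p.1) (some (p.1 + 2))
  if slc = ['{', '{'] then acc ++ [[some p.1, none]]
  else if slc = ['}', '}'] then (closeRevA acc.reverse (p.1 + 2)).reverse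
  else acc

def tag_extract (text : String) : List (List (Option Int)) :=
  (PySem.List.enumerate text.toList 0).foldl (stepA text.toList) []

-- ===== PORT B =====
def goB : List Char → Int → List (List (Option Int)) → List Nat → List (List (Option Int))
  | [], _, acc, _ => acc
  | c :: rest, i, acc, stk =>
    if c = '{' ∧ rest.head? = some '{' then
      goB rest (i + 1) (acc ++ [[some i, none]]) (acc.length :: stk)
    else if c = '}' ∧ rest.head? = some '}' then
      match stk with
      | [] => goB rest (i + 1) acc []
      | j :: stk' => goB rest (i + 1) (acc.modify j (fun e => e.set 1 (some (i + 2)))) stk'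
    else goB rest (i + 1) acc stk

def tag_extract_alt (text : String) : List (List (Option Int)) :=
  goB text.toList 0 [] []

-- ===== PRECONDITION & SPEC =====
def Spec_tag_extract (text : String) (out : List (List (Option Int))) : Prop := out = tag_extract_alt text
instance (text : String) (out : List (List (Option Int))) : Decidable (Spec_tag_extract text out) := by unfold Spec_tag_extract; infer_instance

-- ===== CLAIM (what is proved, stated in full; the proofs are below) =====
def Claim_equal_tag_extract : Prop := ∀ (text : String), Dom_tag_extract text → Spec_tag_extract text (tag_extract text)

-- ===== LEMMAS AND PROOFS =====

/-- An entry is still open (its second slot is `None`). -/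
def Opn (e : List (Option Int)) : Prop := PySem.List.pyGet? e 1 = some none

/-- Loop invariant: `stk` lists, in decreasing order, exactly the indices of the
open entries of `acc`, and every entry has length 2. -/
def LoopInv (acc : List (List (Option Int))) (stk : List Nat) : Prop :=
  stk.Pairwise (· > ·) ∧
  (∀ e ∈ acc, e.length = 2) ∧
  (∀ j ∈ stk, j < acc.length) ∧
  (∀ j (h : j < acc.length), (Opn acc[j] ↔ j ∈ stk))

lemma closeRevA_of_all_closed (xs : List (List (Option Int))) (v : Int)
    (h : ∀ x ∈ xs, ¬ Opn x) : closeRevA xs v = xs := by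
  simp only [Opn] at h
  induction xs with
  | nil => rfl
  | cons x xs ih =>
    simp only [closeRevA]
    rw [if_neg (h x (by simp))]
    rw [ih (fun y hy => h y (by simp [hy]))]

lemma closeRevA_split (xs ys : List (List (Option Int))) (e : List (Option Int)) (v : Int)
    (hx : ∀ x ∈ xs, ¬ Opn x) (he : Opn e) :
    closeRevA (xs ++ e :: ys) v = xs ++ e.set 1 (some v) :: ys := by
  simp only [Opn] at hx he
  induction xs with
  | nil => simp only [List.nil_append, closeRevA, if_pos he]
  | cons x xs ih =>
    simp only [List.cons_append, closeRevA]
    rw [if_neg (hx x (by simp))]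
    rw [ih (fun y hy => hx y (by simp [hy]))]

lemma modify_append (l₁ l₂ : List (List (Option Int))) (e : List (Option Int))
    (f : List (Option Int) → List (Option Int)) :
    List.modify (l₁ ++ e :: l₂) l₁.length f = l₁ ++ f e :: l₂ := by
  induction l₁ with
  | nil => simp
  | cons a l₁ ih => simpa [List.modify_succ_cons] using ih

lemma opn_set_closed (e : List (Option Int)) (v : Int) (he : e.length = 2) :
    ¬ Opn (e.set 1 (some v)) := by
  match e, he with
  | [a, b], _ => simp [Opn, PySem.List.pyGet?, PySem.List.pyIdx?]

/-- With the invariant, A's backward scan closes exactly the entry B's stack pops. -/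
lemma close_eq_modify (acc : List (List (Option Int))) (j : Nat) (stk' : List Nat) (v : Int)
    (h : LoopInv acc (j :: stk')) :
    (closeRevA acc.reverse v).reverse = acc.modify j (fun e => e.set 1 (some v)) ∧
    LoopInv (acc.modify j (fun e => e.set 1 (some v))) stk' := by
  obtain ⟨hpw, hlen, hbnd, hopn⟩ := h
  have hj : j < acc.length := hbnd j (by simp)
  have hstk' : ∀ m ∈ stk', m < j := by
    intro m hm; exact (List.pairwise_cons.1 hpw).1 m hm
  -- split acc at j
  have hsplit : acc = acc.take j ++ acc[j] :: acc.drop (j + 1) := by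
    rw [List.getElem_cons_drop]; exact (List.take_append_drop j acc).symm
  set l₁ := acc.take j with hl₁
  set e := acc[j] with he
  set l₂ := acc.drop (j + 1) with hl₂
  have hlen₁ : l₁.length = j := by simp [hl₁, Nat.le_of_lt hj]
  have heo : Opn e := (hopn j hj).2 (by simp)
  have hclosed₂ : ∀ x ∈ l₂.reverse, ¬ Opn x := by
    intro x hx
    rw [List.mem_reverse] at hx
    obtain ⟨k, hk, rfl⟩ := List.getElem_of_mem hx
    have hk2 : j + 1 + k < acc.length := by
      simp [hl₂] at hk; omega
    have : l₂[k] = acc[j + 1 + k] := by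
      simp [hl₂]
    rw [this]
    intro hop
    have hmem := (hopn (j + 1 + k) hk2).1 hop
    rcases List.mem_cons.1 hmem with h' | h'
    · omega
    · have := hstk' _ h'; omega
  have key : (closeRevA acc.reverse v).reverse = l₁ ++ e.set 1 (some v) :: l₂ := by
    conv_lhs => rw [hsplit]
    rw [show (l₁ ++ e :: l₂).reverse = l₂.reverse ++ e :: l₁.reverse by simp]
    rw [closeRevA_split _ _ _ _ hclosed₂ heo]
    simp
  have hmod : acc.modify j (fun e => e.set 1 (some v)) = l₁ ++ e.set 1 (some v) :: l₂ := by
    conv_lhs => rw [hsplit, ← hlen₁]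
    exact modify_append _ _ _ _
  refine ⟨key.trans hmod.symm, ?_⟩
  rw [hmod]
  have hlenacc : (l₁ ++ e.set 1 (some v) :: l₂).length = acc.length := by
    conv_rhs => rw [hsplit]; simp
    simp
  have hel2 : e.length = 2 := hlen e (by rw [hsplit]; simp)
  refine ⟨hpw.sublist (List.sublist_cons_self _ _), ?_, ?_, ?_⟩
  · intro x hx
    rcases List.mem_append.1 hx with h' | h'
    · exact hlen x (by rw [hsplit]; simp [h'])
    · rcases List.mem_cons.1 h' with h'' | h''
      · subst h''; simpa using hel2
      · exact hlen x (by rw [hsplit]; simp [h''])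
  · intro m hm; rw [hlenacc]; exact hbnd m (by simp [hm])
  · intro k hk
    have hk' : k < acc.length := by rwa [hlenacc] at hk
    by_cases hkj : k = j
    · subst hkj
      have : (l₁ ++ e.set 1 (some v) :: l₂)[k] = e.set 1 (some v) := by
        rw [List.getElem_append_right (by omega)]
        simp [hlen₁]
      rw [this]
      constructor
      · intro hop; exact absurd hop (opn_set_closed e v hel2)
      · intro hm; exact absurd (hstk' k hm) (by omega)
    · have hsame : (l₁ ++ e.set 1 (some v) :: l₂)[k]'hk = acc[k]'hk' := by
        by_cases hlt : k < j
        · rw [List.getElem_append_left (by omega)]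
          simp [hl₁]
        · rw [List.getElem_append_right (by omega : l₁.length ≤ k)]
          have hne : k - l₁.length ≠ 0 := by omega
          rcases Nat.exists_eq_succ_of_ne_zero hne with ⟨m, hm⟩
          have hm2 : m < l₂.length := by
            have := hk; simp only [List.length_append, List.length_cons] at this; omega
          simp only [hm, Nat.succ_eq_add_one, List.getElem_cons_succ]
          have h2 : l₂[m]'hm2 = acc[(j+1)+m]'(by simp [hl₂] at hm2; omega) := by
            simp [hl₂]
          rw [h2]
          congr 1
          omega
      rw [hsame]
      rw [hopn k hk']
      simp only [List.mem_cons]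
      constructor
      · rintro (h' | h'); · exact absurd h' hkj
        · exact h'
      · intro h'; exact Or.inr h'

lemma inv_append (acc : List (List (Option Int))) (stk : List Nat) (i : Int)
    (h : LoopInv acc stk) : LoopInv (acc ++ [[some i, none]]) (acc.length :: stk) := by
  obtain ⟨hpw, hlen, hbnd, hopn⟩ := h
  refine ⟨List.pairwise_cons.2 ⟨fun m hm => hbnd m hm, hpw⟩, ?_, ?_, ?_⟩
  · intro e he
    rcases List.mem_append.1 he with h' | h'
    · exact hlen e h'
    · simp at h'; subst h'; rfl
  · intro m hm
    rcases List.mem_cons.1 hm with h' | h' <;> simp [h']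
    exact Nat.le_of_lt (hbnd m h')
  · intro k hk
    simp only [List.length_append, List.length_cons, List.length_nil] at hk
    by_cases hke : k = acc.length
    · subst hke
      rw [List.getElem_append_right (by omega)]
      simp [Opn, PySem.List.pyGet?, PySem.List.pyIdx?]
    · have hk' : k < acc.length := by omega
      rw [List.getElem_append_left hk']
      rw [hopn k hk']
      simp only [List.mem_cons]
      constructor
      · exact fun h' => Or.inr h'
      · rintro (h' | h'); · omega
        · exact h'

lemma inv_all_closed (acc : List (List (Option Int))) (h : LoopInv acc []) (v : Int) :
    (closeRevA acc.reverse v).reverse = acc := by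
  obtain ⟨_, _, _, hopn⟩ := h
  rw [closeRevA_of_all_closed]
  · exact List.reverse_reverse acc
  · intro x hx
    rw [List.mem_reverse] at hx
    obtain ⟨k, hk, rfl⟩ := List.getElem_of_mem hx
    intro hop
    simpa using (hopn k hk).1 hop

lemma slice_two (pre suf : List Char) :
    PySem.List.slice (pre ++ suf) (some (pre.length : Int)) (some ((pre.length : Int) + 2)) =
      suf.take 2 := by
  have : ((pre.length : Int) + 2) = ((pre.length + 2 : Nat) : Int) := by push_cast; ring
  rw [this, PySem.List.slice_natCast]
  rw [List.drop_left]
  congr 1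
  omega

lemma take_two_eq (c : Char) (rest : List Char) (d : Char) :
    (c :: rest).take 2 = [d, d] ↔ (c = d ∧ rest.head? = some d) := by
  cases rest with
  | nil => simp
  | cons r rs => simp [and_comm]

/-- Main loop correspondence. -/
lemma loop_eq (suf : List Char) : ∀ (pre : List Char) (acc : List (List (Option Int)))
    (stk : List Nat), LoopInv acc stk →
    (PySem.List.enumerate suf (pre.length : Int)).foldl (stepA (pre ++ suf)) acc =
      goB suf (pre.length : Int) acc stk := by
  induction suf with
  | nil => intro pre acc stk _; simp [PySem.List.enumerate, goB]
  | cons c rest ih =>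
    intro pre acc stk hinv
    rw [PySem.List.enumerate_cons, List.foldl_cons]
    have hslc := slice_two pre (c :: rest)
    have hpre1 : ((pre.length : Int) + 1) = (((pre ++ [c]).length : Nat) : Int) := by
      simp
    have hrest : pre ++ c :: rest = (pre ++ [c]) ++ rest := by simp
    simp only [stepA, hslc, goB]
    by_cases h1 : (c :: rest).take 2 = ['{', '{']
    · rw [if_pos h1, if_pos ((take_two_eq c rest '{').1 h1)]
      rw [hpre1, hrest]
      exact ih (pre ++ [c]) _ _ (inv_append acc stk _ hinv)
    · rw [if_neg h1, if_neg (fun hc => h1 ((take_two_eq c rest '{').2 hc))]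
      by_cases h2 : (c :: rest).take 2 = ['}', '}']
      · rw [if_pos h2, if_pos ((take_two_eq c rest '}').1 h2)]
        cases stk with
        | nil =>
          rw [inv_all_closed acc hinv _]
          rw [hpre1, hrest]
          exact ih (pre ++ [c]) _ _ hinv
        | cons j stk' =>
          obtain ⟨heq, hinv'⟩ := close_eq_modify acc j stk' ((pre.length : Int) + 2) hinv
          rw [heq, hpre1, hrest]
          exact ih (pre ++ [c]) _ _ hinv'
      · rw [if_neg h2, if_neg (fun hc => h2 ((take_two_eq c rest '}').2 hc))]
        rw [hpre1, hrest]
        exact ih (pre ++ [c]) _ _ hinv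

-- ===== VERDICT (by name: the statement is the Claim_ definition above) =====
theorem tag_extract_spec : Claim_equal_tag_extract := by
  intro text _
  unfold Spec_tag_extract tag_extract tag_extract_alt
  have := loop_eq text.toList [] [] [] ⟨by simp, by simp, by simp, by simp⟩
  simpa using this
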